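-- pv_equiv track=rewrite | github.com/LittleBeetroot1666/2025fallCS101-------- | Project/assignments/assignmentC/Code/appendix/sy321.py | mount
-- ===== SOURCE A (Python) =====
-- def mount(listie):
--     mount_altitude = [0]
--     for i in range(1, len(listie)):
--         if listie[i] > listie[i - 1]:
--             mount_altitude.append(mount_altitude[-1] + 1)
--         elif listie[i] < listie[i - 1]:
--             mount_altitude.append(mount_altitude[-1] - 1)
--         else:
--             mount_altitude.append(mount_altitude[-1])
--     base_altitude = min(mount_altitude) - 1
--     mount_waterfill = -len(listie) * base_altitude
--     mount_seasum = sum(mount_altitude)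
--     mount_landsum = mount_seasum + mount_waterfill
--     return mount_landsum
-- ===== SOURCE B (Python) =====
-- def _scan(s):
--     # For a sign sequence s, return (sum of prefix sums of s,
--     # min(0, all prefix sums of s), sum(s)), by divide and conquer:
--     # the three values for a concatenation combine from those of its halves.
--     if not s:
--         return (0, 0, 0)
--     if len(s) == 1:
--         v = s[0]
--         return (v, min(0, v), v)
--     m = len(s) // 2
--     tL, mL, lL = _scan(s[:m])
--     tR, mR, lR = _scan(s[m:])
--     return (tL + tR + lL * (len(s) - m), min(mL, lL + mR), lL + lR)
--
--
-- def mount(listie):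
--     signs = [(cur > prev) - (cur < prev) for prev, cur in zip(listie, listie[1:])]
--     total, low, _ = _scan(signs)
--     return total - len(listie) * (low - 1)
-- ===== Notes on version B (the rewrite author's own statement) =====
-- stated objective: alternative
-- what changed: Instead of building the whole altitude list and scanning it with min() and sum(), B maps adjacent pairs to a sign sequence and computes (sum of prefix sums, min prefix sum, total) by divide and conquer, combining the triples of the two halves.
import Mathlib
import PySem

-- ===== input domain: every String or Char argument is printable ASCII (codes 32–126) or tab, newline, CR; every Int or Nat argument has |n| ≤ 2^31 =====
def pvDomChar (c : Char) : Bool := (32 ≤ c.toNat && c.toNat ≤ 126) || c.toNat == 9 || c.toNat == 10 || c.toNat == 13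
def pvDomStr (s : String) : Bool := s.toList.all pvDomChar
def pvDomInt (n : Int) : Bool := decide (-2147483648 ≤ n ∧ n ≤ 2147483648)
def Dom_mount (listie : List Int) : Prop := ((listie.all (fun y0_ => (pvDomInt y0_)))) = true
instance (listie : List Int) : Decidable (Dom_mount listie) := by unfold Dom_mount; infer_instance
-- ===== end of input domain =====

-- B replaces A's build-the-altitude-list-then-min()-and-sum() with a divide-and-conquer
-- over the sign sequence of adjacent differences, combining (sum-of-prefix-sums, min, sum)
-- of the two halves (objective: alternative).

-- ===== PORT A =====
-- loop body of A: append the next altitude to the list (indices i, i-1 are always in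
-- range for i ∈ range(1, len), so .getD 0 is never taken on an admitted input)
def mountStep (listie : List Int) (acc : List Int) (i : Int) : List Int :=
  let cur := (PySem.List.pyGet? listie i).getD 0
  let prev := (PySem.List.pyGet? listie (i - 1)).getD 0
  let last := (PySem.List.pyGet? acc (-1)).getD 0
  if cur > prev then acc ++ [last + 1]
  else if cur < prev then acc ++ [last - 1]
  else acc ++ [last]

def mount (listie : List Int) : Int :=
  let mount_altitude := (PySem.List.pyRange 1 (listie.length : Int) 1).foldl (mountStep listie) [0]
  let base_altitude := ((PySem.List.min? mount_altitude (fun x => x)).getD 0) - 1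
  let mount_waterfill := -(listie.length : Int) * base_altitude
  let mount_seasum := mount_altitude.sum
  mount_seasum + mount_waterfill

-- ===== PORT B =====
-- _scan of Source B: divide and conquer; s[:m] / s[m:] ported as take/drop (exact for
-- 0 ≤ m ≤ len), s[0] via pyGet?
def scanB (s : List Int) : Int × Int × Int :=
  if _h1 : s = [] then (0, 0, 0)
  else if _h2 : s.length = 1 then
    let v := (PySem.List.pyGet? s 0).getD 0
    (v, min 0 v, v)
  else
    let m := s.length / 2
    let L := scanB (s.take m)
    let R := scanB (s.drop m)
    (L.1 + R.1 + L.2.2 * ((s.length : Int) - (m : Int)), min L.2.1 (L.2.2 + R.2.1), L.2.2 + R.2.2)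
termination_by s.length
decreasing_by
  · have h0 : s.length ≠ 0 := fun h => _h1 (List.length_eq_zero_iff.mp h)
    simp only [List.length_take]
    omega
  · have h0 : s.length ≠ 0 := fun h => _h1 (List.length_eq_zero_iff.mp h)
    simp only [List.length_drop]
    omega

-- zip(listie, listie[1:]) ported as zip with drop 1 (exact)
def mount_alt (listie : List Int) : Int :=
  let signs := (listie.zip (listie.drop 1)).map
    (fun pc => (if pc.2 > pc.1 then (1 : Int) else 0) - (if pc.2 < pc.1 then 1 else 0))
  let r := scanB signs
  r.1 - (listie.length : Int) * (r.2.1 - 1)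

-- ===== PRECONDITION & SPEC =====
def Spec_mount (listie : List Int) (out : Int) : Prop := out = mount_alt listie
instance (listie : List Int) (out : Int) : Decidable (Spec_mount listie out) := by unfold Spec_mount; infer_instance

-- ===== CLAIM (what is proved, stated in full; the proofs are below) =====
def Claim_equal_mount : Prop := ∀ (listie : List Int), Dom_mount listie → Spec_mount listie (mount listie)

-- ===== LEMMAS AND PROOFS =====

-- prefix sums of a sign sequence (the altitudes after the initial 0)
def ps : List Int → List Int
  | [] => []
  | x :: r => x :: (ps r).map (x + ·)

-- min(0, all prefix sums)
def min0 (s : List Int) : Int := (ps s).foldl min 0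

def sg (l : List Int) : List Int :=
  (l.zip (l.drop 1)).map
    (fun pc => (if pc.2 > pc.1 then (1 : Int) else 0) - (if pc.2 < pc.1 then 1 else 0))

theorem ps_append (a b : List Int) : ps (a ++ b) = ps a ++ (ps b).map (a.sum + ·) := by
  induction a with
  | nil => simp [ps]
  | cons x t ih =>
    simp only [List.cons_append, ps, ih, List.map_append, List.map_map, List.sum_cons,
      List.cons.injEq, true_and]
    simp [add_assoc]

theorem ps_length (a : List Int) : (ps a).length = a.length := by
  induction a with
  | nil => rfl
  | cons x t ih => simp [ps, ih]

theorem sum_map_add (l : List Int) (c : Int) :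
    (l.map (c + ·)).sum = c * l.length + l.sum := by
  induction l with
  | nil => simp
  | cons x t ih => simp [ih]; ring

theorem foldl_min_min (l : List Int) : ∀ y z : Int, l.foldl min (min y z) = min y (l.foldl min z) := by
  induction l with
  | nil => intro y z; rfl
  | cons a t ih =>
    intro y z
    simp only [List.foldl_cons, min_assoc]
    exact ih y (min z a)

theorem foldl_min_le (l : List Int) (y : Int) : l.foldl min y ≤ y := by
  have := foldl_min_min l y y
  rw [min_self] at this
  rw [this]
  exact min_le_left _ _

theorem foldl_min_le_of_mem (l : List Int) (x : Int) (h : x ∈ l) : ∀ y : Int, l.foldl min y ≤ x := by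
  induction l with
  | nil => cases h
  | cons a t ih =>
    intro y
    rcases List.mem_cons.mp h with rfl | h'
    · calc t.foldl min (min y x) ≤ min y x := foldl_min_le t _
        _ ≤ x := min_le_right _ _
    · simpa only [List.foldl_cons] using ih h' (min y a)

theorem foldl_min_map_add (l : List Int) : ∀ x c : Int,
    (l.map (c + ·)).foldl min x = c + l.foldl min (x - c) := by
  induction l with
  | nil => intro x c; simp
  | cons a t ih =>
    intro x c
    simp only [List.map_cons, List.foldl_cons]
    rw [ih]
    have : min x (c + a) - c = min (x - c) a := by omega
    rw [this]

theorem sum_mem_ps (a : List Int) (h : a ≠ []) : a.sum ∈ ps a := by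
  induction a with
  | nil => exact absurd rfl h
  | cons x t ih =>
    cases t with
    | nil => simp [ps]
    | cons y r =>
      have hmem : (y :: r).sum ∈ ps (y :: r) := ih (by simp)
      show (x :: y :: r).sum ∈ x :: (ps (y :: r)).map (x + ·)
      rw [List.sum_cons]
      exact List.mem_cons_of_mem _ (List.mem_map.mpr ⟨_, hmem, rfl⟩)

theorem min0_append (a b : List Int) :
    min0 (a ++ b) = min (min0 a) (a.sum + min0 b) := by
  unfold min0
  rw [ps_append, List.foldl_append, foldl_min_map_add]
  rcases eq_or_ne a [] with rfl | h
  · have := foldl_min_le (ps b) 0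
    simp only [ps, List.foldl_nil, List.sum_nil, sub_zero, zero_add]
    omega
  · have h1 : (ps a).foldl min 0 ≤ a.sum := foldl_min_le_of_mem _ _ (sum_mem_ps a h) 0
    have h2 : (ps a).foldl min 0 - a.sum = min ((ps a).foldl min 0 - a.sum) 0 := by omega
    rw [h2, foldl_min_min]
    omega

theorem scanB_spec : ∀ (n : Nat) (s : List Int), s.length ≤ n →
    scanB s = ((ps s).sum, min0 s, s.sum) := by
  intro n
  induction n with
  | zero =>
    intro s hs
    have : s = [] := List.length_eq_zero_iff.mp (Nat.le_zero.mp hs)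
    subst this
    rw [scanB]
    simp [ps, min0]
  | succ n ih =>
    intro s hs
    by_cases h1 : s = []
    · subst h1; rw [scanB]; simp [ps, min0]
    by_cases h2 : s.length = 1
    · obtain ⟨v, rfl⟩ : ∃ v, s = [v] := by
        cases s with
        | nil => simp at h2
        | cons x t =>
          cases t with
          | nil => exact ⟨x, rfl⟩
          | cons y r => simp at h2
      rw [scanB]
      simp [ps, min0]
    · rw [scanB]
      simp only [dif_neg h1, dif_neg h2]
      have hlen : 2 ≤ s.length := by
        have : s.length ≠ 0 := by simp [List.length_eq_zero_iff, h1]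
        omega
      set m := s.length / 2 with hm
      have hm1 : 1 ≤ m := by omega
      have hmlt : m < s.length := by omega
      have htake : (s.take m).length = m := by simp; omega
      have hdrop : (s.drop m).length = s.length - m := by simp
      rw [ih (s.take m) (by omega), ih (s.drop m) (by omega)]
      have hsplit : s.take m ++ s.drop m = s := List.take_append_drop m s
      refine Prod.ext ?_ (Prod.ext ?_ ?_)
      · simp only
        conv_rhs => rw [← hsplit]
        rw [ps_append, List.sum_append, sum_map_add, ps_length, hdrop]
        have : ((s.length : Int) - (m : Int)) = ((s.length - m : Nat) : Int) := by omega
        rw [this]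
        ring
      · simp only
        conv_rhs => rw [← hsplit]
        rw [min0_append]
      · simp only
        conv_rhs => rw [← hsplit]
        rw [List.sum_append]

theorem sg_length (l : List Int) : (sg l).length = l.length - 1 := by
  simp [sg]

theorem last0ps (t : List Int) :
    (PySem.List.pyGet? (0 :: ps t) (-1)).getD 0 = t.sum := by
  rcases List.eq_nil_or_concat t with rfl | ⟨t', v, rfl⟩
  · simp [ps, PySem.List.pyGet?_neg_one]
  · rw [List.concat_eq_append, ps_append]
    rw [show (0 :: (ps t' ++ (ps [v]).map (t'.sum + ·))) =
        (0 :: ps t') ++ [t'.sum + v] from by simp [ps]]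
    rw [PySem.List.pyGet?_neg_one_append_singleton]
    simp

theorem mountA_loop (l : List Int) : ∀ k : Nat, k ≤ l.length →
    (PySem.List.pyRange 1 (k : Int) 1).foldl (mountStep l) [0] =
      0 :: ps ((sg l).take (k - 1)) := by
  intro k
  induction k with
  | zero =>
    intro _
    rw [PySem.List.pyRange_one_eq_nil (by omega)]
    simp [ps]
  | succ k ih =>
    intro hk
    by_cases hk0 : k = 0
    · subst hk0
      rw [show ((1 : Nat) : Int) = 1 from rfl, PySem.List.pyRange_one_eq_nil (by omega)]
      simp [ps]
    · have hk1 : 1 ≤ k := by omega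
      have hklt : k < l.length := by omega
      rw [show ((k + 1 : Nat) : Int) = (k : Int) + 1 by push_cast; ring,
        PySem.List.pyRange_one_succ_right (by omega), List.foldl_append,
        ih (by omega)]
      simp only [List.foldl_cons, List.foldl_nil]
      have hcur : PySem.List.pyGet? l (k : Int) = some (l[k]'hklt) :=
        PySem.List.pyGet?_ofNat l k hklt
      have hkm : k - 1 < l.length := by omega
      have hprev : PySem.List.pyGet? l ((k : Int) - 1) = some (l[k - 1]'hkm) := by
        rw [show (k : Int) - 1 = ((k - 1 : Nat) : Int) by omega]
        exact PySem.List.pyGet?_ofNat l (k - 1) hkm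
      have hsgk : k - 1 < (sg l).length := by rw [sg_length]; omega
      have hsgget : (sg l)[k - 1]'hsgk =
          (if l[k]'hklt > l[k - 1]'hkm then (1 : Int) else 0) -
          (if l[k]'hklt < l[k - 1]'hkm then 1 else 0) := by
        simp only [sg, List.getElem_map, List.getElem_zip, List.getElem_drop]
        simp only [show 1 + (k - 1) = k from by omega]
      have htake : (sg l).take (k + 1 - 1) = (sg l).take (k - 1) ++ [(sg l)[k - 1]'hsgk] := by
        rw [show k + 1 - 1 = (k - 1) + 1 by omega]
        rw [List.take_add_one]
        simp [List.getElem?_eq_getElem hsgk]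
      unfold mountStep
      dsimp only
      rw [hcur, hprev]
      simp only [Option.getD_some]
      rw [last0ps, htake, ps_append, hsgget]
      simp only [ps, List.map_cons, List.map_nil]
      split_ifs <;> (simp; try omega)

theorem min?_getD_cons (x : Int) (t : List Int) :
    (PySem.List.min? (x :: t) (fun a => a)).getD 0 = t.foldl min x := by
  simp [PySem.List.min?_id_cons]

-- ===== VERDICT (by name: the statement is the Claim_ definition above) =====
theorem mount_spec : Claim_equal_mount := by
  intro l _
  unfold Spec_mount mount mount_alt
  dsimp only
  rw [mountA_loop l l.length le_rfl]
  have hsg : (sg l).take (l.length - 1) = sg l := by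
    rw [← sg_length]; exact List.take_length
  rw [hsg, min?_getD_cons]
  rw [show ((l.zip (l.drop 1)).map
      (fun pc => (if pc.2 > pc.1 then (1 : Int) else 0) - (if pc.2 < pc.1 then 1 else 0))) =
      sg l from rfl]
  rw [scanB_spec (sg l).length (sg l) le_rfl]
  dsimp only
  unfold min0
  simp only [List.sum_cons]
  ring
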